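-- pv_equiv track=rewrite | github.com/HomerW/3DCSGNet | src/Generator/stack_cuboids.py | parse
-- ===== SOURCE A (Python) =====
-- def parse(expression):
--     """
--     NOTE: This method generates terminal symbol for an input program expressions.
--     :param expression: program expression in postfix notation
--     :return program:
--     """
--     shape_types = ["c"]
--     op = ["*", "+", "-"]
--     program = []
--     for index, value in enumerate(expression):
--         if value in shape_types:
--             program.append({})
--             program[-1]["type"] = "draw"
--
--             # find where the parenthesis closes
--             close_paren = expression[index:].index(")") + index
--             program[-1]["value"] = expression[index:close_paren + 1]
--         elif value in op:
--             program.append({})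
--             program[-1]["type"] = "op"
--             program[-1]["value"] = value
--         else:
--             pass
--     return program
-- ===== SOURCE B (Python) =====
-- def parse(expression):
--     """Single backward pass: track the segment up to the nearest ')' while
--     emitting tokens right-to-left, then reverse once — no forward re-scan for
--     ')' per 'c'. (Where A raises ValueError because a 'c' has no ')' after it,
--     B uses '' as the draw value.)"""
--     ops = ("*", "+", "-")
--     program = []
--     pending = None  # expression[i:j+1] where j is the nearest ')' at/after i, else None
--     for i in range(len(expression) - 1, -1, -1):
--         ch = expression[i]
--         pending = ")" if ch == ")" else (None if pending is None else ch + pending)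
--         if ch == "c":
--             program.append({"type": "draw", "value": pending if pending is not None else ""})
--         elif ch in ops:
--             program.append({"type": "op", "value": ch})
--     program.reverse()
--     return program
-- ===== Notes on version B (the rewrite author's own statement) =====
-- stated objective: alternative
-- what changed: Replaced A's enumerate-and-scan-forward (str.index on each 'c' suffix, then a slice) by one backward pass that carries the segment up to the nearest ')' and emits tokens right-to-left, reversed once; Pre_ excludes inputs where a 'c' has no ')' after it, on which A raises ValueError.
-- outside the precondition, e.g. on parse('c'): A raises ValueError, B returns [{'type': 'draw', 'value': ''}]
import Mathlib
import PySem

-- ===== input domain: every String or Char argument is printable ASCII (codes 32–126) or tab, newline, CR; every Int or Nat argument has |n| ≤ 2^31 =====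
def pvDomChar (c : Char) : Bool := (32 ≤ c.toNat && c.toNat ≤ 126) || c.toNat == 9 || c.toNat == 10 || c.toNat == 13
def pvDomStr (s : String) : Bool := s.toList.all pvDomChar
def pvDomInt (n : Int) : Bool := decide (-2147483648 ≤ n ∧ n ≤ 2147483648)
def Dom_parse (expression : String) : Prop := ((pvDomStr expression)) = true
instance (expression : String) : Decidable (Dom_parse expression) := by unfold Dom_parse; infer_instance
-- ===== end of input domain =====

-- B replaces A's per-'c' forward scan for ')' with one backward pass that carries the
-- segment up to the nearest ')' (alternative single-pass structure, similar cost).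

-- ===== PORT A =====
-- literal transliteration of A: enumerate the string; for 'c' scan the suffix for ')'
-- and slice out expression[index:close+1]; for an operator emit it; else pass.
def parse (expression : String) : List (List (String × String)) :=
  let cs := expression.toList
  (PySem.List.enumerate cs 0).foldl
    (fun program iv =>
      let index := iv.1
      let value := iv.2
      if value ∈ ['c'] then
        match PySem.List.index? (PySem.List.slice cs (some index) none) ')' with
        | some k =>
            program ++ [[("type", "draw"),
              ("value", String.ofList (PySem.List.slice cs (some index) (some (index + (k : Int) + 1))))]]
        | none => program  -- Python raises ValueError here; excluded by Pre_parse
      else if value ∈ ['*', '+', '-'] then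
        program ++ [[("type", "op"), ("value", String.ofList [value])]]
      else program)
    []

-- ===== PORT B =====
-- transliteration of Source B's backward pass: recurse on the tail first (= Source B's
-- right-to-left loop), carrying `pending` = segment up to the nearest ')' inclusive;
-- prepending tokens here is Source B's append-then-reverse.
def parseRev : List Char → Option (List Char) × List (List (String × String))
  | [] => (none, [])
  | ch :: rest =>
    let pr := parseRev rest
    let pending := if ch = ')' then some [')'] else pr.1.map (ch :: ·)
    if ch = 'c' then
      (pending, [("type", "draw"), ("value", String.ofList (pending.getD []))] :: pr.2)
    else if ch = '*' ∨ ch = '+' ∨ ch = '-' then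
      (pending, [("type", "op"), ("value", String.ofList [ch])] :: pr.2)
    else (pending, pr.2)

def parse_alt (expression : String) : List (List (String × String)) :=
  (parseRev expression.toList).2

-- ===== PRECONDITION & SPEC =====
-- Pre_ excludes exactly the inputs on which A raises ValueError: a 'c' with no ')' at or after it.
def Pre_parse (expression : String) : Prop :=
  ∀ i, i < expression.toList.length → expression.toList.getD i ' ' = 'c' →
    ')' ∈ expression.toList.drop i
instance (expression : String) : Decidable (Pre_parse expression) := by
  unfold Pre_parse; infer_instance

def pvWitness_parse : String := "c(2,2,2)+c(4,4,4)*"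

def Spec_parse (expression : String) (out : List (List (String × String))) : Prop := out = parse_alt expression
instance (expression : String) (out : List (List (String × String))) : Decidable (Spec_parse expression out) := by unfold Spec_parse; infer_instance

-- ===== CLAIM (what is proved, stated in full; the proofs are below) =====
def Claim_equal_parse : Prop := ∀ (expression : String), Dom_parse expression → Pre_parse expression → Spec_parse expression (parse expression)

-- ===== LEMMAS AND PROOFS =====

-- the token(s) A emits at position (index, value) of cs
def tokA (cs : List Char) (iv : Int × Char) : List (List (String × String)) :=
  if iv.2 ∈ ['c'] then
    match PySem.List.index? (PySem.List.slice cs (some iv.1) none) ')' with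
    | some k =>
        [[("type", "draw"),
          ("value", String.ofList (PySem.List.slice cs (some iv.1) (some (iv.1 + (k : Int) + 1))))]]
    | none => []
  else if iv.2 ∈ ['*', '+', '-'] then
    [[("type", "op"), ("value", String.ofList [iv.2])]]
  else []

theorem parse_eq_flatMap (expression : String) :
    parse expression =
      (PySem.List.enumerate expression.toList 0).flatMap (tokA expression.toList) := by
  unfold parse
  have hbody : (fun (program : List (List (String × String))) (iv : Int × Char) =>
      if iv.2 ∈ ['c'] then
        match PySem.List.index? (PySem.List.slice expression.toList (some iv.1) none) ')' with
        | some k =>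
            program ++ [[("type", "draw"),
              ("value", String.ofList (PySem.List.slice expression.toList (some iv.1) (some (iv.1 + (k : Int) + 1))))]]
        | none => program
      else if iv.2 ∈ ['*', '+', '-'] then
        program ++ [[("type", "op"), ("value", String.ofList [iv.2])]]
      else program)
      = fun program iv => program ++ tokA expression.toList iv := by
    funext program iv
    unfold tokA
    split
    · split <;> simp
    · split <;> simp
  simp only [hbody, PySem.List.foldl_append_eq_flatMap, List.nil_append]

-- pending-invariant of B's backward pass
theorem parseRev_cons (ch : Char) (rest : List Char) :
    parseRev (ch :: rest) =
      (let pr := parseRev rest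
       let pending := if ch = ')' then some [')'] else pr.1.map (ch :: ·)
       if ch = 'c' then
         (pending, [("type", "draw"), ("value", String.ofList (pending.getD []))] :: pr.2)
       else if ch = '*' ∨ ch = '+' ∨ ch = '-' then
         (pending, [("type", "op"), ("value", String.ofList [ch])] :: pr.2)
       else (pending, pr.2)) := rfl

theorem parseRev_fst (cs : List Char) :
    (parseRev cs).1 = (PySem.List.index? cs ')').map (fun k => cs.take (k + 1)) := by
  induction cs with
  | nil => simp [parseRev, PySem.List.index?]
  | cons ch rest ih =>
    rw [parseRev_cons]
    by_cases hch : ch = ')'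
    · subst hch
      rw [PySem.List.index?_cons_self]
      simp
    · rw [PySem.List.index?_cons_of_ne rest hch]
      split_ifs <;>
        (simp only [ih]
         cases PySem.List.index? rest ')' <;> simp)

theorem main_lemma (cs : List Char)
    (H : ∀ i, i < cs.length → cs.getD i ' ' = 'c' → ')' ∈ cs.drop i) :
    ∀ (suf : List Char) (n : Nat), suf = cs.drop n →
      (PySem.List.enumerate suf (n : Int)).flatMap (tokA cs) = (parseRev suf).2 := by
  intro suf
  induction suf with
  | nil => intro n _; simp [parseRev, PySem.List.enumerate]
  | cons ch rest ih =>
    intro n hdrop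
    have hrest : rest = cs.drop (n + 1) := by
      rw [← List.tail_drop, ← hdrop]; rfl
    have hn : n < cs.length := by
      by_contra h
      have : cs.drop n = [] := List.drop_eq_nil_of_le (by omega)
      rw [this] at hdrop; exact (List.cons_ne_nil _ _) hdrop
    have hget : cs[n]? = some ch := by
      rw [← List.head?_drop, ← hdrop]; rfl
    rw [PySem.List.enumerate_cons, List.flatMap_cons,
      show ((n : Int) + 1) = ((n + 1 : Nat) : Int) by push_cast; ring, ih (n + 1) hrest,
      parseRev_cons]
    have hslice : PySem.List.slice cs (some (n : Int)) none = ch :: rest := by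
      rw [PySem.List.slice_from_natCast, ← hdrop]
    by_cases hc : ch = 'c'
    · -- draw token: Pre guarantees a ')' in the suffix
      subst hc
      have hmem : ')' ∈ 'c' :: rest := by
        rw [hdrop]
        exact H n hn (by simp [List.getD, hget])
      obtain ⟨k, hk⟩ := Option.isSome_iff_exists.mp
        ((PySem.List.index?_isSome_iff ('c' :: rest) ')').mpr hmem)
      have hne : ('c' : Char) ≠ ')' := by decide
      have hkrest : ∃ k', PySem.List.index? rest ')' = some k' ∧ k = k' + 1 := by
        rw [PySem.List.index?_cons_of_ne rest hne] at hk
        cases h' : PySem.List.index? rest ')' with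
        | none => rw [h'] at hk; simp at hk
        | some k' => rw [h'] at hk; simp at hk; exact ⟨k', rfl, hk.symm⟩
      obtain ⟨k', hk', hkk⟩ := hkrest
      have hsliceval : PySem.List.slice cs (some (n : Int)) (some ((n : Int) + (k : Int) + 1))
          = ('c' :: rest).take (k + 1) := by
        have h1 : (n : Int) + (k : Int) + 1 = (n : Int) + ((k + 1 : Nat) : Int) := by
          push_cast; ring
        rw [h1, PySem.List.slice_natCast_add, ← hdrop]
      have hL : tokA cs ((n : Int), 'c')
          = [[("type", "draw"), ("value", String.ofList (('c' :: rest).take (k + 1)))]] := by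
        unfold tokA
        simp only [hslice, hk, hsliceval, List.mem_cons,
          List.not_mem_nil, or_false, if_true]
      rw [hL]
      simp only [parseRev_fst, hk', Option.map_some, reduceIte]
      simp [hkk, List.take_succ_cons]
    · by_cases hop : ch = '*' ∨ ch = '+' ∨ ch = '-'
      · have hL : tokA cs ((n : Int), ch)
            = [[("type", "op"), ("value", String.ofList [ch])]] := by
          unfold tokA
          have hcl : ch ∉ (['c'] : List Char) := by simp [hc]
          have hol : ch ∈ (['*', '+', '-'] : List Char) := by
            rcases hop with h | h | h <;> simp [h]
          simp [hcl, hol]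
        rw [hL]
        simp [hc, hop]
      · have hL : tokA cs ((n : Int), ch) = [] := by
          unfold tokA
          have h1 : ch ∉ (['c'] : List Char) := by simp [hc]
          have h2 : ch ∉ (['*', '+', '-'] : List Char) := by
            intro hmem
            exact hop (by simpa using hmem)
          simp [h1, h2]
        rw [hL]
        simp [hc, hop]

-- ===== VERDICT (by name: the statement is the Claim_ definition above) =====
theorem parse_spec : Claim_equal_parse := by
  intro expression _ hpre
  unfold Spec_parse parse_alt
  rw [parse_eq_flatMap]
  exact main_lemma expression.toList hpre expression.toList 0 (by simp)
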